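-- pv_equiv track=rewrite | github.com/MrHamdulay/csc3-capstone | examples/data/Assignment_6/ovdjon001/question3.py | count
-- ===== SOURCE A (Python) =====
-- def count(l):
--     output = ""
--     parties = []
--     dictionary = {}
--     for i in range(len(l)):
--         if l[i] not in parties:
--             parties.append(l[i])
--     votes = [0]*len(parties)
--     for i in range(len(parties)):
--         for j in range(len(l)):
--             if parties[i] == l[j]:
--                 votes[i] +=1
--     #arrange in alphabetical order
--     for i in range(len(parties)):
--         dictionary.update({parties[i]: votes[i]})
--     for key, value in sorted(dictionary.items()):
--         output+= key + " "*(11-len(key)) + "- "+ str(value) + "\n"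
--     return output
-- ===== SOURCE B (Python) =====
-- def count(l):
--     s = sorted(l)
--     if not s:
--         return ""
--     output = ""
--     cur = s[0]
--     n = 1
--     for p in s[1:]:
--         if p == cur:
--             n += 1
--         else:
--             output += cur + " "*(11-len(cur)) + "- " + str(n) + "\n"
--             cur, n = p, 1
--     output += cur + " "*(11-len(cur)) + "- " + str(n) + "\n"
--     return output
-- ===== Notes on version B (the rewrite author's own statement) =====
-- stated objective: faster
-- what changed: Replaces the dedup pass, the nested party-by-party counting scan, the dict build and the final sort of items by a single sort of the list followed by one linear run-length pass that emits each group's line as it closes.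
import Mathlib
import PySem

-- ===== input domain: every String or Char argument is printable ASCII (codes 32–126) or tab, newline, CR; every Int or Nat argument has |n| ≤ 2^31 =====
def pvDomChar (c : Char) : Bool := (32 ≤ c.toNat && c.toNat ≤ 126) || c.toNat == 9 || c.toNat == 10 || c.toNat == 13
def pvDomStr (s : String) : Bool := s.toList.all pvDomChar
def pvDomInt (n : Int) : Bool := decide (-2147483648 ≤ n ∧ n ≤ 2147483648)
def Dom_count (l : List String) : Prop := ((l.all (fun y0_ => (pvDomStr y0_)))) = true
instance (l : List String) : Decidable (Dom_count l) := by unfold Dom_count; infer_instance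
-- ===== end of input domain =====

-- B replaces A's dedup pass + nested per-party counting scans + dict build + sort of the items
-- by one sort of l and a single run-length pass over it (objective: faster).

-- ===== PORT A =====
-- the formatted line  key + " "*(11-len(key)) + "- " + str(value) + "\n"  (identical expression in both Pythons)
def pvFmtLine (k : String) (v : Int) : List Char :=
  k.toList ++ PySem.List.pyRepeat [' '] (11 - PySem.Str.len k) ++ ['-', ' '] ++ PySem.Int.toChars v ++ ['\n']

def count (l : List String) : String :=
  let parties : List String := l.foldl (fun ps x => if ps.contains x then ps else ps ++ [x]) []
  let votes : List Int := parties.map (fun p => l.foldl (fun n x => if p == x then n + 1 else n) (0 : Int))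
  let d : PySem.Dict String Int := (parties.zip votes).foldl (fun d kv => d.insert kv.1 kv.2) PySem.Dict.empty
  let sortedItems := PySem.List.sorted2 d.items (fun kv => kv.1) (fun kv => kv.2)
  String.ofList (sortedItems.foldl (fun out kv => out ++ pvFmtLine kv.1 kv.2) [])

-- ===== PORT B =====
def pvGroupLoop : List String → String → Int → List Char → List Char
  | [], cur, n, out => out ++ pvFmtLine cur n
  | p :: rest, cur, n, out =>
      if p == cur then pvGroupLoop rest cur (n + 1) out
      else pvGroupLoop rest p 1 (out ++ pvFmtLine cur n)

def count_alt (l : List String) : String :=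
  match PySem.List.sorted l (fun x => x) false with
  | [] => ""
  | x :: rest => String.ofList (pvGroupLoop rest x 1 [])

-- ===== PRECONDITION & SPEC =====
def Spec_count (l : List String) (out : String) : Prop := out = count_alt l
instance (l : List String) (out : String) : Decidable (Spec_count l out) := by unfold Spec_count; infer_instance

-- ===== CLAIM (what is proved, stated in full; the proofs are below) =====
def Claim_equal_count : Prop := ∀ (l : List String), Dom_count l → Spec_count l (count l)

-- ===== LEMMAS AND PROOFS =====

-- canonical form both sides are reduced to: one pvFmtLine per party of m, with its count in s
def pvLines (m : List String) (s : List String) : List Char :=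
  m.flatMap (fun p => pvFmtLine p ((s.count p : Nat) : Int))

-- ---- A-side lemmas ----

theorem pv_cnt_eq (l : List String) (p : String) :
    l.foldl (fun n x => if p == x then n + 1 else n) (0 : Int) = (l.count p : Int) := by
  have h : (fun (n : Int) (x : String) => if p == x then n + 1 else n)
      = (fun (n : Int) (x : String) => if x == p then n + 1 else n) := by
    funext n x; simp [BEq.comm]
  rw [h, PySem.List.foldl_beq_add_one]
  simp

theorem pv_zip_map_self {α β : Type} (g : α → β) : ∀ (m : List α),
    m.zip (m.map g) = m.map (fun p => (p, g p))
  | [] => rfl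
  | x :: t => by simp [pv_zip_map_self g t]

theorem pv_insertBy_congr {α : Type} (f g : α → α → Bool) (x : α) : ∀ (ys : List α),
    (∀ y ∈ ys, f x y = g x y) → PySem.List.insertBy f x ys = PySem.List.insertBy g x ys
  | [], _ => rfl
  | y :: ys, h => by
    simp only [PySem.List.insertBy]
    rw [h y (by simp)]
    split
    · rfl
    · rw [pv_insertBy_congr f g x ys (fun z hz => h z (by simp [hz]))]

theorem pv_foldl_insertBy_congr {α : Type} (f g : α → α → Bool) (S : List α) :
    ∀ (xs acc : List α), (∀ a ∈ xs, a ∈ S) → (∀ a ∈ acc, a ∈ S) →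
    (∀ a b, a ∈ S → b ∈ S → f a b = g a b) →
    xs.foldl (fun acc x => PySem.List.insertBy f x acc) acc
      = xs.foldl (fun acc x => PySem.List.insertBy g x acc) acc
  | [], acc, _, _, _ => rfl
  | x :: xs, acc, hxs, hacc, hfg => by
    simp only [List.foldl_cons]
    have hx : x ∈ S := hxs x (by simp)
    have h1 : PySem.List.insertBy f x acc = PySem.List.insertBy g x acc :=
      pv_insertBy_congr f g x acc (fun y hy => hfg x y hx (hacc y hy))
    rw [h1]
    exact pv_foldl_insertBy_congr f g S xs _ (fun a ha => hxs a (by simp [ha]))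
      (fun a ha => by
        rw [PySem.List.mem_insertBy] at ha
        rcases ha with ha | ha
        · exact ha ▸ hx
        · exact hacc a ha) hfg

-- sorted(items): with pairwise-distinct first components the tuple comparison of sorted2
-- never reaches the second component, so it is the key-only sort
theorem pv_sorted2_eq_sorted_fst (ps : List (String × Int))
    (hinj : ∀ a b, a ∈ ps → b ∈ ps → a.1 = b.1 → a = b) :
    PySem.List.sorted2 ps (fun kv => kv.1) (fun kv => kv.2)
      = PySem.List.sorted ps (fun kv => kv.1) := by
  rw [PySem.List.sorted_eq_foldl_insertBy]
  simp only [PySem.List.sorted2]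
  apply pv_foldl_insertBy_congr _ _ ps _ _ (fun a ha => ha) (by simp)
  intro a b ha hb
  rcases lt_trichotomy a.1 b.1 with h | h | h
  · simp [h, not_lt.mpr h.le]
  · have : a = b := hinj a b ha hb h
    subst this
    simp
  · simp [h, not_lt.mpr h.le]

theorem pv_countA_eq (l : List String) :
    count l = String.ofList (pvLines (PySem.List.sorted (PySem.List.dedup l) (fun x => x)) l) := by
  unfold count
  dsimp only
  have hparties : l.foldl (fun ps x => if ps.contains x then ps else ps ++ [x]) []
      = PySem.List.dedup l := rfl
  rw [hparties]
  have hvotes : (PySem.List.dedup l).map (fun p => l.foldl (fun n x => if p == x then n + 1 else n) (0 : Int))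
      = (PySem.List.dedup l).map (fun p => ((l.count p : Nat) : Int)) :=
    List.map_congr_left (fun p _ => pv_cnt_eq l p)
  rw [hvotes, pv_zip_map_self]
  set f : String → String × Int := fun p => (p, ((l.count p : Nat) : Int)) with hf
  have hnodup : ((PySem.List.dedup l).map f).map Prod.fst |>.Nodup := by
    have : ((PySem.List.dedup l).map f).map Prod.fst = PySem.List.dedup l := by
      simp [hf, Function.comp_def]
    rw [this]
    simp [PySem.List.dedup_eq_ofList, PySem.Set.nodup_ofList]
  have hitems : (((PySem.List.dedup l).map f).foldl (fun d kv => d.insert kv.1 kv.2)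
      PySem.Dict.empty).items = (PySem.List.dedup l).map f := by
    rw [PySem.Dict.items_foldl_insert_fresh ((PySem.List.dedup l).map f) Prod.fst Prod.snd
      PySem.Dict.empty (fun a _ => by simp [PySem.Dict.contains_empty]) hnodup]
    simp [PySem.Dict.empty]
  rw [hitems]
  have hinj : ∀ a b, a ∈ (PySem.List.dedup l).map f → b ∈ (PySem.List.dedup l).map f →
      a.1 = b.1 → a = b := by
    intro a b ha hb hab
    simp only [List.mem_map] at ha hb
    obtain ⟨p, _, rfl⟩ := ha
    obtain ⟨q, _, rfl⟩ := hb
    simp only [hf] at hab ⊢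
    simp [hab]
  rw [pv_sorted2_eq_sorted_fst _ hinj]
  have hsorted : PySem.List.sorted ((PySem.List.dedup l).map f) (fun kv => kv.1)
      = (PySem.List.sorted (PySem.List.dedup l) (fun x => x)).map f := by
    apply PySem.List.sorted_eq_of_perm_of_pairwise_lt
    · exact (PySem.List.sorted_perm _ _ _).map f
    · have hlt := PySem.List.sorted_ofList_pairwise_lt (κ := String) l
      rw [← PySem.List.dedup_eq_ofList] at hlt
      exact List.Pairwise.map f (fun a b h => by simpa [hf] using h) hlt
  rw [hsorted, PySem.List.foldl_append_eq_flatMap]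
  simp only [List.nil_append, List.flatMap_map]
  rfl

-- ---- B-side lemmas ----

theorem pv_foldl_add_filter {α : Type} [BEq α] [LawfulBEq α] : ∀ (t s : List α),
    t.foldl PySem.Set.add s = s ++ PySem.Set.ofList (t.filter (fun y => !(s.contains y)))
  | [], s => by simp [PySem.Set.ofList]
  | y :: t, s => by
    simp only [List.foldl_cons, List.filter_cons]
    by_cases hc : s.contains y
    · simp only [hc, Bool.not_true, Bool.false_eq_true, if_false, PySem.Set.add,
        PySem.Set.contains]
      exact pv_foldl_add_filter t s
    · simp only [Bool.not_eq_true] at hc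
      simp only [hc, Bool.not_false, if_true, PySem.Set.add, PySem.Set.contains,
        Bool.false_eq_true, if_false]
      rw [pv_foldl_add_filter t (s ++ [y])]
      have hof : PySem.Set.ofList (y :: t.filter (fun z => !(s.contains z)))
          = [y] ++ PySem.Set.ofList ((t.filter (fun z => !(s.contains z))).filter
              (fun z => !([y].contains z))) := by
        have : PySem.Set.ofList (y :: t.filter (fun z => !(s.contains z)))
            = (t.filter (fun z => !(s.contains z))).foldl PySem.Set.add [y] := by
          simp [PySem.Set.ofList_eq_foldl, PySem.Set.add, PySem.Set.contains]
        rw [this, pv_foldl_add_filter _ [y]]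
      rw [hof, List.filter_filter]
      have hpred : ∀ z : α, (!([y].contains z) && !(s.contains z))
          = !((s ++ [y]).contains z) := by
        intro z
        by_cases hz : z = y <;> by_cases hzs : z ∈ s <;> simp [hz, hzs]
      simp only [hpred, List.append_assoc]
termination_by t _ => t.length
decreasing_by
· simp
· simp
· have _h1 := List.length_filter_le (fun z => !decide (z ∈ s)) t
  have h2 := List.length_filter_le (fun z => !s.contains z) t
  simp only [List.length_cons]
  omega

theorem pv_dedup_cons {α : Type} [BEq α] [LawfulBEq α] (x : α) (t : List α) :
    PySem.List.dedup (x :: t) = x :: PySem.List.dedup (t.filter (fun y => !(y == x))) := by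
  simp only [PySem.List.dedup_eq_ofList, PySem.Set.ofList_eq_foldl]
  have h0 : (x :: t).foldl PySem.Set.add [] = t.foldl PySem.Set.add [x] := by
    simp [PySem.Set.add, PySem.Set.contains]
  rw [h0, pv_foldl_add_filter t [x]]
  have : (fun y => !([x].contains y)) = (fun y : α => !(y == x)) := by
    funext y; simp
  rw [this]
  simp [pv_foldl_add_filter]

theorem pv_dedup_mem {α : Type} [BEq α] [LawfulBEq α] (a : α) (t : List α) :
    a ∈ PySem.List.dedup t ↔ a ∈ t := PySem.List.mem_dedup t a

-- dedup of a ≤-sorted list is <-sorted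
theorem pv_dedup_pairwise_lt : ∀ (t : List String), t.Pairwise (· ≤ ·) →
    (PySem.List.dedup t).Pairwise (· < ·)
  | [], _ => by simp [PySem.List.dedup_eq_ofList, PySem.Set.ofList]
  | x :: t, h => by
    rw [pv_dedup_cons]
    rcases List.pairwise_cons.mp h with ⟨hx, ht⟩
    constructor
    · intro b hb
      rw [pv_dedup_mem, List.mem_filter] at hb
      exact lt_of_le_of_ne (hx b hb.1) (fun he => by simp [he.symm] at hb)
    · exact pv_dedup_pairwise_lt _ (List.Pairwise.filter _ ht)
termination_by t => t.length
decreasing_by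
  have := List.length_filter_le (fun y => !(y == x)) t
  simp only [List.length_cons]; omega

theorem pv_pvLines_congr : ∀ (m : List String) (s1 s2 : List String),
    (∀ p ∈ m, s1.count p = s2.count p) → pvLines m s1 = pvLines m s2
  | [], _, _, _ => rfl
  | p :: m, s1, s2, h => by
    unfold pvLines
    simp only [List.flatMap_cons]
    rw [h p (by simp)]
    have := pv_pvLines_congr m s1 s2 (fun q hq => h q (by simp [hq]))
    unfold pvLines at this
    rw [this]

-- the invariant of B's single pass: on a sorted suffix s whose elements all lie at or above the
-- open group cur (n votes so far), the loop closes cur's group and emits one line per later party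
theorem pv_group_spec : ∀ (s : List String) (cur : String) (n : Int) (out : List Char),
    s.Pairwise (· ≤ ·) → (∀ x ∈ s, cur ≤ x) →
    pvGroupLoop s cur n out = out ++ pvFmtLine cur (n + (s.count cur : Nat)) ++
      pvLines (PySem.List.dedup (s.filter (fun y => !(y == cur))))
        (s.filter (fun y => !(y == cur)))
  | [], cur, n, out, _, _ => by
    simp [pvGroupLoop, pvLines, PySem.List.dedup_eq_ofList, PySem.Set.ofList]
  | x :: t, cur, n, out, hs, hcur => by
    rcases List.pairwise_cons.mp hs with ⟨hx, ht⟩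
    by_cases hxc : x = cur
    · subst hxc
      simp only [pvGroupLoop, BEq.rfl, if_true]
      rw [pv_group_spec t x (n + 1) out ht (fun y hy => hx y hy)]
      have hcnt : (n + 1) + (t.count x : Nat) = n + (((x :: t).count x : Nat) : Int) := by
        simp [List.count_cons_self]; omega
      have hfilt : (x :: t).filter (fun y => !(y == x)) = t.filter (fun y => !(y == x)) := by
        simp
      rw [hcnt, hfilt]
    · have hlt : ∀ y ∈ x :: t, cur < y := by
        intro y hy
        rcases List.mem_cons.mp hy with rfl | hy'
        · exact lt_of_le_of_ne (hcur y hy) (Ne.symm hxc)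
        · exact lt_of_lt_of_le (lt_of_le_of_ne (hcur x (by simp)) (Ne.symm hxc)) (hx y hy')
      have hne : (x == cur) = false := by simp [hxc]
      simp only [pvGroupLoop, hne, Bool.false_eq_true, if_false]
      rw [pv_group_spec t x 1 (out ++ pvFmtLine cur n) ht hx]
      have hc0 : (x :: t).count cur = 0 :=
        List.count_eq_zero.mpr (fun hm => lt_irrefl cur (hlt cur hm))
      have hfilt : (x :: t).filter (fun y => !(y == cur)) = x :: t :=
        List.filter_eq_self.mpr (fun y hy => by simp [ne_of_gt (hlt y hy)])
      rw [hc0, hfilt, pv_dedup_cons]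
      have hpl : pvLines (PySem.List.dedup (t.filter (fun y => !(y == x)))) (x :: t)
          = pvLines (PySem.List.dedup (t.filter (fun y => !(y == x))))
              (t.filter (fun y => !(y == x))) := by
        apply pv_pvLines_congr
        intro p hp
        rw [pv_dedup_mem] at hp
        rcases List.mem_filter.mp hp with ⟨hpt, hpx⟩
        have hpx' : p ≠ x := by simpa using hpx
        simp [Ne.symm hpx', hpx]
      have hcons : pvLines (x :: PySem.List.dedup (t.filter (fun y => !(y == x)))) (x :: t)
          = pvFmtLine x (((x :: t).count x : Nat) : Int)
            ++ pvLines (PySem.List.dedup (t.filter (fun y => !(y == x)))) (x :: t) := rfl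
      rw [hcons, hpl, List.count_cons_self]
      push_cast
      simp [List.append_assoc, add_comm]

theorem pv_group_top (x : String) (rest : List String)
    (h : (x :: rest).Pairwise (· ≤ ·)) :
    pvGroupLoop rest x 1 [] = pvLines (PySem.List.dedup (x :: rest)) (x :: rest) := by
  rcases List.pairwise_cons.mp h with ⟨hx, ht⟩
  rw [pv_group_spec rest x 1 [] ht hx, pv_dedup_cons]
  have hcons : pvLines (x :: PySem.List.dedup (rest.filter (fun y => !(y == x)))) (x :: rest)
      = pvFmtLine x (((x :: rest).count x : Nat) : Int)
        ++ pvLines (PySem.List.dedup (rest.filter (fun y => !(y == x)))) (x :: rest) := rfl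
  have hpl : pvLines (PySem.List.dedup (rest.filter (fun y => !(y == x)))) (x :: rest)
      = pvLines (PySem.List.dedup (rest.filter (fun y => !(y == x))))
          (rest.filter (fun y => !(y == x))) := by
    apply pv_pvLines_congr
    intro p hp
    rw [pv_dedup_mem] at hp
    rcases List.mem_filter.mp hp with ⟨hpt, hpx⟩
    have hpx' : p ≠ x := by simpa using hpx
    simp [Ne.symm hpx', hpx]
  rw [hcons, hpl, List.count_cons_self]
  push_cast
  simp [add_comm]

theorem pv_countB_eq (l : List String) :
    count_alt l = String.ofList (pvLines (PySem.List.sorted (PySem.List.dedup l) (fun x => x)) l) := by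
  unfold count_alt
  rcases hs : PySem.List.sorted l (fun x => x) false with _ | ⟨x, rest⟩
  · have hl : l = [] := (PySem.List.sorted_eq_nil_iff l _ false).mp hs
    subst hl
    rfl
  · have hsp : (x :: rest).Pairwise (· ≤ ·) := by
      rw [← hs]; exact PySem.List.sorted_pairwise l (fun x => x)
    show String.ofList (pvGroupLoop rest x 1 []) = _
    rw [pv_group_top x rest hsp]
    congr 1
    have hperm : (x :: rest).Perm l := hs ▸ PySem.List.sorted_perm l (fun x => x) false
    have h1 : pvLines (PySem.List.dedup (x :: rest)) (x :: rest)
        = pvLines (PySem.List.dedup (x :: rest)) l :=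
      pv_pvLines_congr _ _ _ (fun p _ => hperm.count_eq p)
    rw [h1]
    have h2 : PySem.List.dedup (x :: rest) = PySem.List.sorted (PySem.List.dedup l) (fun x => x) := by
      symm
      apply PySem.List.sorted_eq_of_perm_of_pairwise_lt
      · rw [List.perm_ext_iff_of_nodup (PySem.List.nodup_dedup _) (PySem.List.nodup_dedup _)]
        intro a
        rw [PySem.List.mem_dedup, PySem.List.mem_dedup]
        exact hperm.mem_iff
      · exact pv_dedup_pairwise_lt _ hsp
    rw [h2]

-- ===== VERDICT (by name: the statement is the Claim_ definition above) =====
theorem count_spec : Claim_equal_count := by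
  intro l _
  unfold Spec_count
  rw [pv_countA_eq, pv_countB_eq]
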